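-- pv_equiv track=rewrite | github.com/KangminLim/CodingTest | 프로그래머스/1/155652. 둘만의 암호/둘만의 암호.py | solution
-- ===== SOURCE A (Python) =====
-- def solution(s, skip, index):
--     answer = ''
--     skip = list(skip)
--
--     for ch in s:
--         tmp = 0
--         while tmp != index:
--             if ch == 'z':
--                 ch = chr(ord('a'))
--             else:
--                 ch = chr(ord(ch) + 1)
--
--             if ch not in skip:
--                 tmp += 1
--         answer += ch
--     return answer
-- ===== SOURCE B (Python) =====
-- def solution(s, skip, index):
--     if index == 0:
--         return s
--     skipset = set(skip)
--     allowed = [c for c in "abcdefghijklmnopqrstuvwxyz" if c not in skipset]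
--     out = []
--     for ch in s:
--         climb = [chr(x) for x in range(ord(ch) + 1, 123) if chr(x) not in skipset]
--         if index <= len(climb):
--             out.append(climb[index - 1])
--         else:
--             out.append(allowed[(index - len(climb) - 1) % len(allowed)])
--     return ''.join(out)
-- ===== Notes on version B (the rewrite author's own statement) =====
-- stated objective: faster
-- what changed: A advances each character one code point at a time, index times, re-scanning skip at every step; B precomputes the allowed lowercase alphabet once and answers each character with one bounded scan up to 'z' plus a single modular index into that alphabet; Pre_ excludes negative index and all-lowercase-skipped inputs (A loops forever) and strings with characters above 'z', a corner outside the cipher's lowercase alphabet where A walks past 'z' into arbitrary code points while B cycles into the lowercase alphabet - neither value is specified.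
-- outside the precondition, e.g. on solution('~', '', 1): A returns '\x7f', B returns 'a'; on solution('{a', 'xyz', 3): A returns '~d', B returns 'cd'
import Mathlib
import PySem

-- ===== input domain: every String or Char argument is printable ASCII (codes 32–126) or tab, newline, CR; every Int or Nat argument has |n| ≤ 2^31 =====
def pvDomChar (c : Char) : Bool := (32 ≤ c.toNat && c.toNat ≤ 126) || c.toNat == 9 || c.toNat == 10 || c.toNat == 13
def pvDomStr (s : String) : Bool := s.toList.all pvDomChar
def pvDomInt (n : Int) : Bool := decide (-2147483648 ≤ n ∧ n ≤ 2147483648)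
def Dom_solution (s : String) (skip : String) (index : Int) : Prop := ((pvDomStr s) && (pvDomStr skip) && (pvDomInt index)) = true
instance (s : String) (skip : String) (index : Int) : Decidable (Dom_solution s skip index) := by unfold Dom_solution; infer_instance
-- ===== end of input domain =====

-- B replaces A's per-character step-by-step walk (index iterations per character, each
-- re-scanning skip) by one bounded scan up to 'z' plus one modular index into the
-- precomputed allowed lowercase alphabet.

-- ===== PORT A =====
-- one iteration of A's character advance: 'z' wraps to 'a', otherwise the next code point
def pvStep (c : Char) : Char := if c = 'z' then Char.ofNat 97 else Char.ofNat (c.toNat + 1)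

-- fuel bound for A's while loop: under Pre_solution the loop always ends within this many
-- iterations (at most 122 raw steps reach 'z'; after that every 26 raw steps count at least one)
def pvFuel (index : Int) : Nat := 160 + 26 * index.toNat

-- the while loop: `while tmp != index: step ch; if ch not in skip: tmp += 1`
def pvLoopA (skipL : List Char) (index : Int) : Char → Int → Nat → Char
  | ch, _, 0 => ch
  | ch, tmp, f+1 =>
    if tmp = index then ch
    else
      let ch' := pvStep ch
      pvLoopA skipL index ch' (if skipL.contains ch' then tmp else tmp + 1) f

def solution (s : String) (skip : String) (index : Int) : String :=
  let skipL := skip.toList                 -- skip = list(skip)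
  -- answer = ''; for ch in s: … ; answer += ch
  String.ofList ((s.toList).foldl (fun acc ch => acc ++ [pvLoopA skipL index ch 0 (pvFuel index)]) [])

-- ===== PORT B =====
-- [chr(x) for x in range(lo, hi)]
def pvRangeChars (lo hi : Nat) : List Char := (List.range' lo (hi - lo)).map Char.ofNat

-- per-character result of B (index ≠ 0 branch): climb to 'z', then cycle over allowed
def pvBChar (sset : PySem.Set Char) (allowed : List Char) (index : Int) (ch : Char) : Char :=
  let climb := (pvRangeChars (ch.toNat + 1) 123).filter (fun c => !(PySem.Set.contains sset c))
  let t : Int := climb.length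
  if index ≤ t then (PySem.List.pyGet? climb (index - 1)).getD 'a'  -- climb[index-1], in range in this branch
  else (PySem.List.pyGet? allowed (PySem.Int.mod (index - t - 1) allowed.length)).getD 'a'  -- allowed[(index-t-1) % m]

def solution_alt (s : String) (skip : String) (index : Int) : String :=
  if index = 0 then s
  else
    let sset := PySem.Set.ofList skip.toList                          -- skipset = set(skip)
    let allowed := ("abcdefghijklmnopqrstuvwxyz".toList).filter (fun c => !(PySem.Set.contains sset c))
    String.ofList ((s.toList).map (pvBChar sset allowed index))       -- out list + ''.join

-- ===== PRECONDITION & SPEC =====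
-- Pre_ excludes: (a) index < 0, where A's while loop never terminates; (b) positive index with
-- every lowercase letter in skip and s nonempty, where A loops forever; (c) strings containing
-- characters above 'z', a corner outside the cipher's lowercase alphabet on which no value is
-- specified: A's stepping walks past 'z' into arbitrary higher code points while B cycles into
-- the lowercase alphabet, and neither value is more defensible than the other.
def Pre_solution (s : String) (skip : String) (index : Int) : Prop :=
  0 ≤ index ∧
  (0 < index → s.toList.all (fun c => decide (c.toNat ≤ 122)) = true) ∧
  ((0 < index ∧ s.toList ≠ []) →
      "abcdefghijklmnopqrstuvwxyz".toList.any (fun c => !skip.toList.contains c) = true)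
instance (s : String) (skip : String) (index : Int) : Decidable (Pre_solution s skip index) := by
  unfold Pre_solution; infer_instance

def pvWitness_solution : String × String × Int := ("aukks", "wbqd", 5)

def Spec_solution (s : String) (skip : String) (index : Int) (out : String) : Prop := out = solution_alt s skip index
instance (s : String) (skip : String) (index : Int) (out : String) : Decidable (Spec_solution s skip index out) := by unfold Spec_solution; infer_instance

-- ===== CLAIM (what is proved, stated in full; the proofs are below) =====
def Claim_equal_solution : Prop := ∀ (s : String) (skip : String) (index : Int), Dom_solution s skip index → Pre_solution s skip index → Spec_solution s skip index (solution s skip index)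

-- ===== LEMMAS AND PROOFS =====

-- valid code points round-trip through Char.ofNat
theorem pvToNat_ofNat {o : Nat} (h : o < 55296) : (Char.ofNat o).toNat = o := by
  have hv : o.isValidChar := Or.inl h
  rw [Char.ofNat, dif_pos hv]
  simp [Char.ofNatAux, Char.toNat]

theorem pvStep_ofNat {o : Nat} (h122 : o ≠ 122) (h : o + 1 < 55296) :
    pvStep (Char.ofNat o) = Char.ofNat (o + 1) := by
  have ht : (Char.ofNat o).toNat = o := pvToNat_ofNat (by omega)
  have hz : Char.ofNat o ≠ 'z' := by
    intro he
    have : (Char.ofNat o).toNat = 122 := by rw [he]; decide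
    omega
  rw [pvStep, if_neg hz, ht]

-- raw path of A's step function (the successive values of ch) and its iterate
def pvPath (c : Char) : Nat → List Char
  | 0 => []
  | n+1 => pvStep c :: pvPath (pvStep c) n

def pvIter : Nat → Char → Char
  | 0, c => c
  | n+1, c => pvIter n (pvStep c)

theorem pvChain : ∀ (n o : Nat), (∀ i, i < n → o + i ≠ 122) → o + n < 55296 →
    pvPath (Char.ofNat o) n = (List.range' (o+1) n).map Char.ofNat ∧
    pvIter n (Char.ofNat o) = Char.ofNat (o + n) := by
  intro n
  induction n with
  | zero => intro o _ _; simp [pvPath, pvIter]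
  | succ m ih =>
    intro o hz hv
    have hs : pvStep (Char.ofNat o) = Char.ofNat (o + 1) := by
      refine pvStep_ofNat ?_ (by omega)
      have := hz 0 (by omega); omega
    have hrec := ih (o+1) (fun i hi => by have := hz (i+1) (by omega); omega) (by omega)
    constructor
    · show pvStep (Char.ofNat o) :: pvPath (pvStep (Char.ofNat o)) m = _
      rw [hs, hrec.1, List.range'_succ]
      rfl
    · show pvIter m (pvStep (Char.ofNat o)) = _
      rw [hs, hrec.2]
      congr 1
      omega

-- a..z as a list
def pvLC : List Char := (List.range' 97 26).map Char.ofNat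

theorem pvLC_eq : "abcdefghijklmnopqrstuvwxyz".toList = pvLC := by decide

theorem pvCycle26 : pvPath 'z' 26 = pvLC ∧ pvIter 26 'z' = 'z' := by decide

def pvRep (l : List Char) : Nat → List Char
  | 0 => []
  | q+1 => l ++ pvRep l q

theorem pvPath_append (a : Nat) : ∀ (b : Nat) (c : Char),
    pvPath c (a + b) = pvPath c a ++ pvPath (pvIter a c) b := by
  induction a with
  | zero => intro b c; simp [pvPath, pvIter]
  | succ n ih =>
    intro b c
    have h : n + 1 + b = (n + b) + 1 := by omega
    rw [h]
    show pvStep c :: pvPath (pvStep c) (n + b) = _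
    rw [ih]
    rfl

theorem pvIter_add (a : Nat) : ∀ (b : Nat) (c : Char), pvIter (a + b) c = pvIter b (pvIter a c) := by
  induction a with
  | zero => intro b c; rw [Nat.zero_add]; rfl
  | succ n ih =>
    intro b c
    have h : n + 1 + b = (n + b) + 1 := by omega
    rw [h]
    show pvIter (n + b) (pvStep c) = _
    rw [ih]
    rfl

theorem pvPath_cycle : ∀ q, pvPath 'z' (26*q) = pvRep pvLC q ∧ pvIter (26*q) 'z' = 'z' := by
  intro q
  induction q with
  | zero => simp [pvPath, pvIter, pvRep]
  | succ p ih =>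
    have h : 26 * (p+1) = 26 + 26*p := by ring
    rw [h, pvPath_append 26 (26*p) 'z', pvCycle26.1, pvCycle26.2, ih.1]
    refine ⟨rfl, ?_⟩
    rw [pvIter_add 26 (26*p) 'z', pvCycle26.2, ih.2]

theorem pvFilter_rep (P : Char → Bool) (l : List Char) : ∀ q, (pvRep l q).filter P = pvRep (l.filter P) q := by
  intro q; induction q with
  | zero => rfl
  | succ p ih => simp [pvRep, List.filter_append, ih]

theorem pvRep_length (l : List Char) : ∀ q, (pvRep l q).length = q * l.length := by
  intro q; induction q with
  | zero => simp [pvRep]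
  | succ p ih => simp [pvRep, ih, Nat.succ_mul]; ring

theorem pvContains_ofList (l : List Char) (c : Char) :
    PySem.Set.contains (PySem.Set.ofList l) c = l.contains c := by
  by_cases h : c ∈ l <;> simp [PySem.Set.contains, PySem.Set.mem_ofList, h]

-- the loop returns its argument once tmp = index
theorem pvLoopA_done (skipL : List Char) (index : Int) (ch : Char) :
    ∀ f, pvLoopA skipL index ch index f = ch := by
  intro f; cases f <;> simp [pvLoopA]

-- the loop returns the k-th (1-based) non-skip character along the raw path,
-- provided the path prefix of length f' already contains k of them
theorem pvLoopA_get (skipL : List Char) (index : Int) :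
    ∀ (f' f : Nat) (ch : Char) (k : Nat), 1 ≤ k → f' ≤ f →
      k ≤ ((pvPath ch f').filter (fun c => !skipL.contains c)).length →
      pvLoopA skipL index ch (index - k) f
        = ((pvPath ch f').filter (fun c => !skipL.contains c)).getD (k-1) 'a' := by
  intro f'
  induction f' with
  | zero => intro f ch k hk _ hlen; simp [pvPath] at hlen; omega
  | succ n ih =>
    intro f ch k hk hf hlen
    obtain ⟨g, rfl⟩ : ∃ g, f = g + 1 := ⟨f - 1, by omega⟩
    have hne : index - (k : Int) ≠ index := by omega
    rw [pvLoopA, if_neg hne]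
    simp only [pvPath] at hlen ⊢
    by_cases hc : skipL.contains (pvStep ch)
    · simp only [hc, List.filter_cons, Bool.not_true, if_true] at hlen ⊢
      exact ih g (pvStep ch) k hk (by omega) hlen
    · have hcb : (skipL.contains (pvStep ch)) = false := by simpa using hc
      simp only [hcb, List.filter_cons, Bool.not_false, Bool.false_eq_true, if_true, if_false] at hlen ⊢
      rcases Nat.lt_or_ge 1 k with hk2 | hk1
      · -- k ≥ 2
        have harg : index - (k : Int) + 1 = index - ((k - 1 : Nat) : Int) := by
          have : ((k - 1 : Nat) : Int) = (k : Int) - 1 := by omega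
          rw [this]; ring
        rw [harg, ih g (pvStep ch) (k-1) (by omega) (by omega) (by simp at hlen ⊢; omega)]
        have h2 : k - 1 = (k - 2) + 1 := by omega
        rw [h2, List.getD_cons_succ]
        congr 1
      · -- k = 1
        have hk1' : k = 1 := by omega
        subst hk1'
        have h1 : index - ((1:Nat) : Int) + 1 = index := by push_cast; ring
        rw [h1, pvLoopA_done]
        simp

-- getD across "prefix ++ cyclic repetitions", phrased on the already-filtered stream
theorem pvRep_getD (A : List Char) : ∀ (Q n : Nat), 1 ≤ n → n ≤ Q * A.length →
    (pvRep A Q).getD (n-1) 'a' = A.getD ((n-1) % A.length) 'a' := by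
  intro Q
  induction Q with
  | zero => intro n h1 h2; simp at h2; omega
  | succ p ih =>
    intro n h1 h2
    have hm : 0 < A.length := by
      rcases Nat.eq_zero_or_pos A.length with h0 | h0
      · rw [h0, Nat.mul_zero] at h2; omega
      · exact h0
    by_cases h : n ≤ A.length
    · rw [pvRep, List.getD_append _ _ _ _ (by omega), Nat.mod_eq_of_lt (by omega)]
    · rw [pvRep, List.getD_append_right _ _ _ _ (by omega)]
      have he : n - 1 - A.length = (n - A.length) - 1 := by omega
      rw [he, ih (n - A.length) (by omega) (by rw [Nat.succ_mul] at h2; omega)]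
      congr 1
      have : n - 1 = (n - A.length - 1) + A.length := by omega
      rw [this, Nat.add_mod_right]

theorem pvStream_getD (T A : List Char) (Q n : Nat) (h1 : 1 ≤ n) (hle : n ≤ T.length + Q * A.length) :
    (T ++ pvRep A Q).getD (n-1) 'a'
      = if n ≤ T.length then T.getD (n-1) 'a' else A.getD ((n - T.length - 1) % A.length) 'a' := by
  by_cases h : n ≤ T.length
  · rw [if_pos h, List.getD_append _ _ _ _ (by omega)]
  · rw [if_neg h, List.getD_append_right _ _ _ _ (by omega)]
    have he : n - 1 - T.length = (n - T.length) - 1 := by omega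
    rw [he, pvRep_getD A Q (n - T.length) (by omega) (by omega)]

-- the filtered stream value equals B's "bounded prefix, then modular" lookup
theorem pvCompare (Tl A : List Char) (index : Int) (n : Nat) (hidx : index = (n : Int))
    (h1 : 1 ≤ n) (Q : Nat) (hQ : n ≤ Tl.length + Q * A.length) :
    (Tl ++ pvRep A Q).getD (n-1) 'a'
      = if index ≤ (Tl.length : Int) then (PySem.List.pyGet? Tl (index - 1)).getD 'a'
        else (PySem.List.pyGet? A (PySem.Int.mod (index - (Tl.length : Int) - 1) (A.length : Int))).getD 'a' := by
  rw [pvStream_getD Tl A Q n h1 hQ]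
  by_cases h : n ≤ Tl.length
  · rw [if_pos h, if_pos (by omega)]
    rw [PySem.List.pyGet?_of_nonneg _ (by omega)]
    have ht : (index - 1).toNat = n - 1 := by omega
    rw [ht, List.getD_eq_getElem?_getD]
  · rw [if_neg h, if_neg (by omega)]
    have hcast : index - (Tl.length : Int) - 1 = ((n - Tl.length - 1 : Nat) : Int) := by omega
    rw [hcast, PySem.Int.mod_natCast, PySem.List.pyGet?_natCast, List.getD_eq_getElem?_getD]

-- the per-character equivalence (index ≥ 1, character at most 'z', allowed nonempty)
theorem pvCharEq (skipL : List Char) (index : Int) (h1 : 1 ≤ index) (ch : Char)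
    (hch : ch.toNat ≤ 122) (hm : (pvLC.filter fun c => !skipL.contains c) ≠ []) :
    pvLoopA skipL index ch 0 (pvFuel index)
      = pvBChar (PySem.Set.ofList skipL) (pvLC.filter fun c => !skipL.contains c) index ch := by
  obtain ⟨n, hidx⟩ : ∃ n : Nat, index = (n : Int) := ⟨index.toNat, by omega⟩
  have hn1 : 1 ≤ n := by omega
  have hzero : (0 : Int) = index - (n : Int) := by omega
  have hself : Char.ofNat ch.toNat = ch := Char.ofNat_toNat ch
  have hmpos : 0 < (pvLC.filter fun c => !skipL.contains c).length := List.length_pos_of_ne_nil hm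
  -- A's raw path: climb to 'z' in (122 - o) steps, then n full a..z cycles
  have hchain := pvChain (122 - ch.toNat) ch.toNat (fun i hi => by omega) (by omega)
  have hz122 : Char.ofNat (ch.toNat + (122 - ch.toNat)) = 'z' := by
    have h : ch.toNat + (122 - ch.toNat) = 122 := by omega
    rw [h]
  have hpath : pvPath ch ((122 - ch.toNat) + 26*n)
      = (List.range' (ch.toNat+1) (122 - ch.toNat)).map Char.ofNat ++ pvRep pvLC n := by
    have h0 : pvPath (Char.ofNat ch.toNat) ((122 - ch.toNat) + 26*n)
        = (List.range' (ch.toNat+1) (122 - ch.toNat)).map Char.ofNat ++ pvRep pvLC n := by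
      rw [pvPath_append, hchain.1, hchain.2, hz122, (pvPath_cycle n).1]
    rw [hself] at h0
    exact h0
  have hfil : (pvPath ch ((122-ch.toNat) + 26*n)).filter (fun c => !skipL.contains c)
      = ((List.range' (ch.toNat+1) (122-ch.toNat)).map Char.ofNat).filter (fun c => !skipL.contains c)
        ++ pvRep (pvLC.filter fun c => !skipL.contains c) n := by
    rw [hpath, List.filter_append, pvFilter_rep]
  have hnm : n * 1 ≤ n * (pvLC.filter fun c => !skipL.contains c).length :=
    Nat.mul_le_mul_left n hmpos
  have hlen : n ≤ ((pvPath ch ((122-ch.toNat) + 26*n)).filter (fun c => !skipL.contains c)).length := by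
    rw [hfil]
    simp only [List.length_append, pvRep_length]
    omega
  have hres : pvLoopA skipL index ch 0 (pvFuel index)
      = ((pvPath ch ((122-ch.toNat) + 26*n)).filter fun c => !skipL.contains c).getD (n-1) 'a' := by
    rw [hzero]
    exact pvLoopA_get skipL index _ (pvFuel index) ch n hn1 (by simp [pvFuel]; omega) hlen
  rw [hres, hfil]
  simp only [pvBChar, pvContains_ofList, pvRangeChars]
  have h122 : 123 - (ch.toNat+1) = 122 - ch.toNat := by omega
  rw [h122, pvCompare _ _ index n hidx hn1 n (by omega)]

-- ===== VERDICT (by name: the statement is the Claim_ definition above) =====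
theorem solution_spec : Claim_equal_solution := by
  unfold Claim_equal_solution
  intro s skip index hdom hpre
  unfold Spec_solution
  obtain ⟨h0, hpre2, hpre3⟩ := hpre
  rw [solution, solution_alt]
  simp only [PySem.List.foldl_append_singleton_eq_map, List.nil_append]
  by_cases hz : index = 0
  · subst hz
    rw [if_pos rfl]
    have hid : ∀ ch : Char, pvLoopA skip.toList 0 ch 0 (pvFuel 0) = ch := fun ch =>
      pvLoopA_done skip.toList 0 ch (pvFuel 0)
    simp only [hid, List.map_id', String.ofList_toList]
  · rw [if_neg hz]
    have h1 : 1 ≤ index := by omega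
    simp only [pvLC_eq, pvContains_ofList]
    congr 1
    apply List.map_congr_left
    intro ch hch
    have hne : s.toList ≠ [] := by intro he; rw [he] at hch; exact absurd hch List.not_mem_nil
    have hc122 : ch.toNat ≤ 122 := by
      have := List.all_eq_true.mp (hpre2 (by omega)) ch hch
      simpa using this
    refine pvCharEq skip.toList index h1 ch hc122 ?_
    intro hnil
    have hany := hpre3 ⟨by omega, hne⟩
    simp only [List.any_eq_true] at hany
    obtain ⟨c, hc, hcb⟩ := hany
    have : c ∈ pvLC.filter (fun c => !skip.toList.contains c) :=
      List.mem_filter.mpr ⟨by rwa [pvLC_eq] at hc, hcb⟩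
    rw [hnil] at this
    exact absurd this List.not_mem_nil
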